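-- pv_equiv track=rewrite | github.com/stephanelx88/AI0314-Lectures | Module1/Week2/07_tokenizer.py | compute_bag_of_words
-- ===== SOURCE A (Python) =====
-- def compute_bag_of_words(corpus: list) -> list[str]:
--     '''Returns a list of unique words from the corpus
--
--     Args:
--         corpus: list of the sentences
--
--         Returns: list of unique words from the corpus
--     '''
--     bag_of_words = []
--
--     for sentence in corpus:
--         words = sentence.split(' ')
--
--         for word in words:
--             if word not in bag_of_words:
--                 bag_of_words.append(word)
--
--     bag_of_words = sorted(bag_of_words)
--
--     return bag_of_words
-- ===== SOURCE B (Python) =====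
-- def compute_bag_of_words(corpus: list) -> list[str]:
--     '''Returns sorted unique words: flatten all tokens, sort once, drop adjacent duplicates.'''
--     words = []
--     for sentence in corpus:
--         words.extend(sentence.split(' '))
--     words.sort()
--     if not words:
--         return []
--     out = [words[0]]
--     prev = words[0]
--     for w in words[1:]:
--         if w != prev:
--             out.append(w)
--             prev = w
--     return out
-- ===== Notes on version B (the rewrite author's own statement) =====
-- stated objective: faster
-- what changed: Replaces A's per-word linear membership scan of the growing unique list (then sort) with: flatten all tokens once, sort the full multiset once, and remove adjacent duplicates in a single pass.
import Mathlib
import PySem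

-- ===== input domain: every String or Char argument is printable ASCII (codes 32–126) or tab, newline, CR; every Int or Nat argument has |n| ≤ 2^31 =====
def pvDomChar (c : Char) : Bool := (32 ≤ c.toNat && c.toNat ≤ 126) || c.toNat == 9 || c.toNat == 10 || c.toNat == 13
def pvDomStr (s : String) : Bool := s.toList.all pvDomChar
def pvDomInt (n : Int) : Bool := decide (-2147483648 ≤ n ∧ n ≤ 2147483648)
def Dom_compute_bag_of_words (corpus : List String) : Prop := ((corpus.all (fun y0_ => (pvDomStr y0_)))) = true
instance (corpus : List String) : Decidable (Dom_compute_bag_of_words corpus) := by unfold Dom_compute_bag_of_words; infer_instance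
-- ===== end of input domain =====

-- B changes the algorithm: flatten all tokens, sort once, drop adjacent duplicates,
-- instead of A's linear membership scan of the growing unique list before sorting.

-- sentence.split(' '): the separator " " is nonempty, so PySem.Str.split? is always `some`
def pvSplitSp (s : String) : List String := (PySem.Str.split? s " ").getD []

-- ===== PORT A =====
def compute_bag_of_words (corpus : List String) : List String :=
  let bag := corpus.foldl
    (fun bag sentence =>
      (pvSplitSp sentence).foldl (fun b word => if word ∈ b then b else b ++ [word]) bag)
    []
  PySem.List.sorted bag (fun x => x) false

-- ===== PORT B =====
-- the `for w in words[1:]` dedup loop of Source B, carrying `prev` (its state) as the argument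
def pvDedupGo (prev : String) : List String → List String
  | [] => []
  | y :: ys => if y = prev then pvDedupGo prev ys else y :: pvDedupGo y ys

def compute_bag_of_words_alt (corpus : List String) : List String :=
  let words := corpus.foldl (fun acc s => acc ++ pvSplitSp s) []
  match PySem.List.sorted words (fun x => x) false with
  | [] => []
  | x :: rest => x :: pvDedupGo x rest

-- ===== PRECONDITION & SPEC =====
def Spec_compute_bag_of_words (corpus : List String) (out : List String) : Prop := out = compute_bag_of_words_alt corpus
instance (corpus : List String) (out : List String) : Decidable (Spec_compute_bag_of_words corpus out) := by unfold Spec_compute_bag_of_words; infer_instance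

-- ===== CLAIM (what is proved, stated in full; the proofs are below) =====
def Claim_equal_compute_bag_of_words : Prop := ∀ (corpus : List String), Dom_compute_bag_of_words corpus → Spec_compute_bag_of_words corpus (compute_bag_of_words corpus)

-- ===== LEMMAS AND PROOFS =====

-- A's inner dedup step: membership of the fold result
theorem mem_foldl_dedup (ws : List String) (acc : List String) (x : String) :
    x ∈ ws.foldl (fun b word => if word ∈ b then b else b ++ [word]) acc ↔ x ∈ acc ∨ x ∈ ws := by
  induction ws generalizing acc with
  | nil => simp
  | cons w ws ih =>
    simp only [List.foldl_cons, ih]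
    by_cases h : w ∈ acc
    · simp only [h, if_true, List.mem_cons]
      exact ⟨fun h2 => h2.imp_right Or.inr,
        fun h2 => h2.elim Or.inl (fun h3 => h3.elim (fun e => Or.inl (e ▸ h)) Or.inr)⟩
    · simp only [h, if_false, List.mem_append, List.mem_cons]
      tauto

theorem nodup_foldl_dedup (ws : List String) (acc : List String) (h : acc.Nodup) :
    (ws.foldl (fun b word => if word ∈ b then b else b ++ [word]) acc).Nodup := by
  induction ws generalizing acc with
  | nil => exact h
  | cons w ws ih =>
    simp only [List.foldl_cons]
    by_cases hw : w ∈ acc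
    · simp only [hw, if_true]; exact ih _ h
    · simp only [hw, if_false]
      refine ih _ ?_
      rw [List.nodup_append]
      exact ⟨h, List.nodup_singleton _, by
        intro a ha b hb
        rcases List.mem_singleton.mp hb with rfl
        exact fun e => hw (e ▸ ha)⟩

-- fusing A's two nested loops into one fold over the flattened token list
theorem foldl_foldl_eq_flat (corpus : List String) (acc : List String) :
    corpus.foldl
      (fun bag sentence =>
        (pvSplitSp sentence).foldl (fun b word => if word ∈ b then b else b ++ [word]) bag)
      acc
    = (corpus.flatMap pvSplitSp).foldl (fun b word => if word ∈ b then b else b ++ [word]) acc := by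
  induction corpus generalizing acc with
  | nil => rfl
  | cons s cs ih => simp [List.foldl_append, ih]

-- B's extend loop is the flattened token list
theorem foldl_extend_eq_flat (corpus : List String) (acc : List String) :
    corpus.foldl (fun acc s => acc ++ pvSplitSp s) acc = acc ++ corpus.flatMap pvSplitSp := by
  induction corpus generalizing acc with
  | nil => simp
  | cons s cs ih => simp [ih]

theorem mem_pvDedupGo (prev : String) (xs : List String) (x : String)
    (h : (prev :: xs).Pairwise (· ≤ ·)) :
    x ∈ pvDedupGo prev xs ↔ x ∈ xs ∧ x ≠ prev := by
  induction xs generalizing prev with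
  | nil => simp [pvDedupGo]
  | cons y ys ih =>
    rcases List.pairwise_cons.mp h with ⟨hprev, hys⟩
    rcases List.pairwise_cons.mp hys with ⟨hy, _⟩
    by_cases hyp : y = prev
    · subst hyp
      have e : pvDedupGo y (y :: ys) = pvDedupGo y ys := by simp [pvDedupGo]
      rw [e, ih y hys]
      constructor
      · rintro ⟨hx, hne⟩; exact ⟨List.mem_cons_of_mem _ hx, hne⟩
      · rintro ⟨hx, hne⟩
        rcases List.mem_cons.mp hx with rfl | hx
        · exact absurd rfl hne
        · exact ⟨hx, hne⟩
    · have hpy : prev ≤ y := hprev y (List.mem_cons_self ..)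
      have hpy' : prev < y := lt_of_le_of_ne hpy (fun e => hyp e.symm)
      have e : pvDedupGo prev (y :: ys) = y :: pvDedupGo y ys := by simp [pvDedupGo, hyp]
      rw [e]
      simp only [List.mem_cons, ih y hys]
      constructor
      · rintro (rfl | ⟨hx, hne⟩)
        · exact ⟨Or.inl rfl, ne_of_gt hpy'⟩
        · refine ⟨Or.inr hx, ?_⟩
          have : y ≤ x := hy x hx
          exact ne_of_gt (lt_of_lt_of_le hpy' this)
      · rintro ⟨rfl | hx, hne⟩
        · exact Or.inl rfl
        · by_cases hxy : x = y
          · exact Or.inl hxy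
          · exact Or.inr ⟨hx, hxy⟩

theorem sorted_pvDedupGo (prev : String) (xs : List String)
    (h : (prev :: xs).Pairwise (· ≤ ·)) :
    (pvDedupGo prev xs).Pairwise (· < ·) ∧ ∀ z ∈ pvDedupGo prev xs, prev < z := by
  induction xs generalizing prev with
  | nil => simp [pvDedupGo]
  | cons y ys ih =>
    rcases List.pairwise_cons.mp h with ⟨hprev, hys⟩
    by_cases hyp : y = prev
    · subst hyp
      have e : pvDedupGo y (y :: ys) = pvDedupGo y ys := by simp [pvDedupGo]
      rw [e]
      exact ih y hys
    · have hpy : prev < y :=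
        lt_of_le_of_ne (hprev y (List.mem_cons_self ..)) (fun e => hyp e.symm)
      rcases ih y hys with ⟨hpw, hall⟩
      have e : pvDedupGo prev (y :: ys) = y :: pvDedupGo y ys := by simp [pvDedupGo, hyp]
      rw [e]
      refine ⟨List.pairwise_cons.mpr ⟨hall, hpw⟩, ?_⟩
      intro z hz
      rcases List.mem_cons.mp hz with rfl | hz
      · exact hpy
      · exact lt_trans hpy (hall z hz)

-- the core identity on the flattened token list
theorem core_ident (ws : List String) :
    PySem.List.sorted (ws.foldl (fun b word => if word ∈ b then b else b ++ [word]) []) (fun x => x) false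
    = (match PySem.List.sorted ws (fun x => x) false with
       | [] => []
       | x :: rest => x :: pvDedupGo x rest) := by
  have hmem_bag : ∀ x, x ∈ ws.foldl (fun b word => if word ∈ b then b else b ++ [word]) [] ↔ x ∈ ws := by
    intro x; rw [mem_foldl_dedup]; simp
  have hnodup_bag : (ws.foldl (fun b word => if word ∈ b then b else b ++ [word]) []).Nodup :=
    nodup_foldl_dedup ws [] (by simp)
  have hsp : (PySem.List.sorted ws (fun x => x) false).Pairwise (· ≤ ·) :=
    PySem.List.sorted_pairwise ws (fun x => x)
  cases hcase : PySem.List.sorted ws (fun x => x) false with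
  | nil =>
    have hnil : ws = [] := (PySem.List.sorted_eq_nil_iff ws (fun x => x) false).mp hcase
    subst hnil
    rfl
  | cons x rest =>
    rw [hcase] at hsp
    rcases sorted_pvDedupGo x rest hsp with ⟨hpw, hall⟩
    have hB_pw : (x :: pvDedupGo x rest).Pairwise (· < ·) :=
      List.pairwise_cons.mpr ⟨hall, hpw⟩
    have hB_mem : ∀ z, z ∈ x :: pvDedupGo x rest ↔ z ∈ ws := by
      intro z
      have hms : z ∈ PySem.List.sorted ws (fun x => x) false ↔ z ∈ ws :=
        PySem.List.mem_sorted ws (fun x => x) false z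
      rw [hcase] at hms
      rw [← hms]
      simp only [List.mem_cons, mem_pvDedupGo x rest z hsp]
      constructor
      · rintro (rfl | ⟨hz, _⟩)
        · exact Or.inl rfl
        · exact Or.inr hz
      · rintro (rfl | hz)
        · exact Or.inl rfl
        · by_cases hzx : z = x
          · exact Or.inl hzx
          · exact Or.inr ⟨hz, hzx⟩
    have hB_nodup : (x :: pvDedupGo x rest).Nodup :=
      List.Pairwise.imp (fun h => ne_of_lt h) hB_pw
    have hperm : (x :: pvDedupGo x rest).Perm
        (ws.foldl (fun b word => if word ∈ b then b else b ++ [word]) []) := by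
      apply List.perm_of_nodup_nodup_toFinset_eq hB_nodup hnodup_bag
      apply Finset.ext
      intro z
      simp only [List.mem_toFinset]
      rw [hB_mem z, hmem_bag z]
    show _ = x :: pvDedupGo x rest
    exact PySem.List.sorted_eq_of_perm_of_pairwise_lt _ (x :: pvDedupGo x rest)
      (fun x => x) hperm hB_pw

-- ===== VERDICT (by name: the statement is the Claim_ definition above) =====
theorem compute_bag_of_words_spec : Claim_equal_compute_bag_of_words := by
  intro corpus _
  show PySem.List.sorted _ _ _ = _
  unfold compute_bag_of_words_alt
  rw [foldl_foldl_eq_flat, foldl_extend_eq_flat]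
  simp only [List.nil_append]
  exact core_ident (corpus.flatMap pvSplitSp)
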